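-- pv_equiv track=rewrite | github.com/yangwenbo99/wikimedia-quality-image-processing | download_images/meta-filter.py | is_photo
-- ===== SOURCE A (Python) =====
-- from typing import Any, Dict, Iterable, List, Optional, Sequence, Tuple, Union
--
-- PHOTO_EXTENSIONS = {".jpg", ".jpeg", ".jpe", ".tif", ".tiff"}
--
-- ImageInfo = Dict[str, Any]
--
-- def is_photo(ii: ImageInfo) -> bool:
--     """
--     Heuristic: treat JPEG/TIFF images as photos.
--
--     This follows the observation that digital artworks are unlikely to
--     be saved as JPEG/TIFF when labelled as "Quality Image" on Commons.
--     """
--     url = ii.get("url")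
--     if not isinstance(url, str):
--         return False
--     url_l = url.lower()
--     for ext in PHOTO_EXTENSIONS:
--         if url_l.endswith(ext):
--             return True
--     return False
-- ===== SOURCE B (Python) =====
-- PHOTO_BARE_EXTENSIONS = {"jpg", "jpeg", "jpe", "tif", "tiff"}
--
-- def is_photo(ii) -> bool:
--     url = ii.get("url")
--     if not isinstance(url, str):
--         return False
--     _, sep, tail = url.lower().rpartition('.')
--     return sep == '.' and tail in PHOTO_BARE_EXTENSIONS
-- ===== Notes on version B (the rewrite author's own statement) =====
-- stated objective: simpler
-- what changed: Instead of looping over the five dotted extensions with endswith, B extracts the text after the last '.' once via rpartition and does a single set lookup of the bare extension (a dotless URL never matches because rpartition reports no separator).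
import Mathlib
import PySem

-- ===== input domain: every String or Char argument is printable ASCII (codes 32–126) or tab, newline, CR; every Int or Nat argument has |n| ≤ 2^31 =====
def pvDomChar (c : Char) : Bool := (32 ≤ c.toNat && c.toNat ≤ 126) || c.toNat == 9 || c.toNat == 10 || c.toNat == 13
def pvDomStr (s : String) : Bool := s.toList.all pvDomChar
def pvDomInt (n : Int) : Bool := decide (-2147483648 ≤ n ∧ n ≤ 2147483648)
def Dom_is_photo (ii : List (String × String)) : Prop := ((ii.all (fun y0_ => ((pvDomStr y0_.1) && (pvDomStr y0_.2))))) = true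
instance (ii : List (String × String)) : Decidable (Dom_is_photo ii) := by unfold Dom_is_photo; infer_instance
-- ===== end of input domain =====

-- B replaces the loop over PHOTO_EXTENSIONS with a single rpartition('.') and one set lookup of the bare extension (objective: simpler).

-- ===== PORT A =====
-- PHOTO_EXTENSIONS iterated with early return; any iteration order gives the same Bool, ported in source order.
def photoExtensions : List String := [".jpg", ".jpeg", ".jpe", ".tif", ".tiff"]

def is_photo (ii : List (String × String)) : Bool :=
  match (PySem.Dict.mk ii).get? "url" with
  | none => false                 -- ii.get("url") is None → not a str → return False
  | some url =>
    let url_l := PySem.Str.lower url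
    photoExtensions.any (fun ext => PySem.Str.endswith url_l ext)

-- ===== PORT B =====
def photoBareExtensions : List (List Char) :=
  [['j','p','g'], ['j','p','e','g'], ['j','p','e'], ['t','i','f'], ['t','i','f','f']]

-- url_l.rpartition('.'): was a separator found, and the (reversed) chars after the last '.'?
-- Ported by scanning the reversed character list up to the first '.' (exact for the one-char separator '.').
def rpartTailRev? (cs : List Char) : Option (List Char) :=
  let r := cs.reverse
  let t := r.takeWhile (fun c => c ≠ '.')
  if t.length = r.length then none else some t

def is_photo_alt (ii : List (String × String)) : Bool :=
  match (PySem.Dict.mk ii).get? "url" with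
  | none => false
  | some url =>
    match rpartTailRev? (PySem.Chars.lower url.toList) with
    | none => false                              -- sep == '' : no '.' in the url
    | some trev => photoBareExtensions.contains trev.reverse

-- ===== PRECONDITION & SPEC =====
def Spec_is_photo (ii : List (String × String)) (out : Bool) : Prop := out = is_photo_alt ii
instance (ii : List (String × String)) (out : Bool) : Decidable (Spec_is_photo ii out) := by unfold Spec_is_photo; infer_instance

-- ===== CLAIM (what is proved, stated in full; the proofs are below) =====
def Claim_equal_is_photo : Prop := ∀ (ii : List (String × String)), Dom_is_photo ii → Spec_is_photo ii (is_photo ii)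

-- ===== LEMMAS AND PROOFS =====

-- takeWhile (· ≠ '.') consumes exactly a dot-free block up to the first '.'.
theorem takeWhile_eats (e s : List Char) (he : ∀ c ∈ e, c ≠ '.') :
    (e ++ '.' :: s).takeWhile (fun c => c ≠ '.') = e := by
  induction e with
  | nil => simp
  | cons a as ih =>
    have ha : a ≠ '.' := he a (by simp)
    rw [List.cons_append, List.takeWhile_cons, if_pos (by simpa using ha),
        ih (fun c hc => he c (by simp [hc]))]

-- the first element dropWhile keeps fails the predicate
theorem dropWhile_head_false {α : Type} {p : α → Bool} (r : List α) (c : α) (s : List α)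
    (h : r.dropWhile p = c :: s) : p c = false := by
  induction r with
  | nil => simp [List.dropWhile] at h
  | cons a as ih =>
    rw [List.dropWhile_cons] at h
    by_cases hp : p a
    · exact ih (by simpa [hp] using h)
    · simp [hp] at h; rw [← h.1]; simpa using hp

-- If e contains no '.', "e ++ ['.'] is a prefix of r" says exactly that the first
-- dot-free segment of r is e and r does contain a '.'.
theorem prefix_dot_iff_takeWhile (r e : List Char) (he : ∀ c ∈ e, c ≠ '.') :
    (e ++ ['.'] <+: r) ↔
      (r.takeWhile (fun c => c ≠ '.') = e ∧
       (r.takeWhile (fun c => c ≠ '.')).length ≠ r.length) := by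
  constructor
  · rintro ⟨s, hs⟩
    have hr : r = e ++ '.' :: s := by rw [← hs]; simp
    subst hr
    have htw := takeWhile_eats e s he
    refine ⟨htw, ?_⟩
    rw [htw]
    simp only [List.length_append, List.length_cons]
    omega
  · rintro ⟨ht, hlen⟩
    have hsplit := List.takeWhile_append_dropWhile (p := fun c => decide (c ≠ '.')) (l := r)
    rcases hdm : r.dropWhile (fun c => decide (c ≠ '.')) with _ | ⟨c, s⟩
    · exfalso
      rw [hdm, List.append_nil] at hsplit
      exact hlen (by rw [hsplit])
    · have hc : c = '.' := by
        have := dropWhile_head_false r c s hdm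
        simpa using this
      refine ⟨s, ?_⟩
      rw [← hsplit, ht, hdm, hc]
      simp
-- endswith with a dotted extension, read off the reversed list.
theorem ends_iff (l e : List Char) (he : '.' ∉ e) :
    PySem.Chars.endswith l ('.' :: e) = true ↔
      ((l.reverse.takeWhile (fun c => c ≠ '.')).reverse = e ∧
       (l.reverse.takeWhile (fun c => c ≠ '.')).length ≠ l.reverse.length) := by
  rw [PySem.Chars.endswith_iff, ← List.reverse_prefix]
  have he2 : ∀ c ∈ e, c ≠ '.' := fun c hc h => he (h ▸ hc)
  have he' : ∀ c ∈ e.reverse, c ≠ '.' := fun c hc => he2 c (by simpa using hc)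
  rw [show ('.' :: e).reverse = e.reverse ++ ['.'] by simp]
  rw [prefix_dot_iff_takeWhile l.reverse e.reverse he']
  constructor
  · rintro ⟨h1, h2⟩; exact ⟨by rw [h1]; simp, h2⟩
  · rintro ⟨h1, h2⟩
    refine ⟨?_, h2⟩
    have := congrArg List.reverse h1
    simpa using this

-- The heart of the equivalence: the five endswith tests agree with
-- extract-the-last-extension-then-look-it-up, on every character list.
set_option maxRecDepth 8192 in
theorem any_endswith_eq_rpart (l : List Char) :
    photoExtensions.any (fun ext => PySem.Chars.endswith l ext.toList) =
      (match rpartTailRev? l with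
       | none => false
       | some trev => photoBareExtensions.contains trev.reverse) := by
  unfold rpartTailRev?
  by_cases hfound : (l.reverse.takeWhile (fun c => c ≠ '.')).length = l.reverse.length
  · rw [if_pos hfound]
    show _ = false
    simp only [List.any_eq_false, photoExtensions]
    intro ext hext
    fin_cases hext
    · rw [show (".jpg".toList) = '.' :: ['j','p','g'] by decide]
      intro hc; exact ((ends_iff l ['j','p','g'] (by decide)).mp hc).2 hfound
    · rw [show (".jpeg".toList) = '.' :: ['j','p','e','g'] by decide]
      intro hc; exact ((ends_iff l ['j','p','e','g'] (by decide)).mp hc).2 hfound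
    · rw [show (".jpe".toList) = '.' :: ['j','p','e'] by decide]
      intro hc; exact ((ends_iff l ['j','p','e'] (by decide)).mp hc).2 hfound
    · rw [show (".tif".toList) = '.' :: ['t','i','f'] by decide]
      intro hc; exact ((ends_iff l ['t','i','f'] (by decide)).mp hc).2 hfound
    · rw [show (".tiff".toList) = '.' :: ['t','i','f','f'] by decide]
      intro hc; exact ((ends_iff l ['t','i','f','f'] (by decide)).mp hc).2 hfound
  · rw [if_neg hfound]
    show _ = photoBareExtensions.contains (l.reverse.takeWhile (fun c => c ≠ '.')).reverse
    by_cases hmem :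
        photoBareExtensions.contains (l.reverse.takeWhile (fun c => c ≠ '.')).reverse = true
    · rw [hmem]
      simp only [photoBareExtensions, List.contains_eq_mem, List.mem_cons,
        List.not_mem_nil, or_false, decide_eq_true_eq] at hmem
      simp only [List.any_eq_true, photoExtensions]
      rcases hmem with h | h | h | h | h
      · exact ⟨".jpg", by simp, by
          rw [show (".jpg".toList) = '.' :: ['j','p','g'] by decide]
          exact (ends_iff l ['j','p','g'] (by decide)).mpr ⟨h, hfound⟩⟩
      · exact ⟨".jpeg", by simp, by
          rw [show (".jpeg".toList) = '.' :: ['j','p','e','g'] by decide]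
          exact (ends_iff l ['j','p','e','g'] (by decide)).mpr ⟨h, hfound⟩⟩
      · exact ⟨".jpe", by simp, by
          rw [show (".jpe".toList) = '.' :: ['j','p','e'] by decide]
          exact (ends_iff l ['j','p','e'] (by decide)).mpr ⟨h, hfound⟩⟩
      · exact ⟨".tif", by simp, by
          rw [show (".tif".toList) = '.' :: ['t','i','f'] by decide]
          exact (ends_iff l ['t','i','f'] (by decide)).mpr ⟨h, hfound⟩⟩
      · exact ⟨".tiff", by simp, by
          rw [show (".tiff".toList) = '.' :: ['t','i','f','f'] by decide]
          exact (ends_iff l ['t','i','f','f'] (by decide)).mpr ⟨h, hfound⟩⟩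
    · rw [Bool.eq_false_iff.mpr hmem]
      simp only [List.any_eq_false, photoExtensions]
      intro ext hext
      fin_cases hext
      · rw [show (".jpg".toList) = '.' :: ['j','p','g'] by decide]
        intro hc
        exact hmem (by rw [((ends_iff l ['j','p','g'] (by decide)).mp hc).1]; decide)
      · rw [show (".jpeg".toList) = '.' :: ['j','p','e','g'] by decide]
        intro hc
        exact hmem (by rw [((ends_iff l ['j','p','e','g'] (by decide)).mp hc).1]; decide)
      · rw [show (".jpe".toList) = '.' :: ['j','p','e'] by decide]
        intro hc
        exact hmem (by rw [((ends_iff l ['j','p','e'] (by decide)).mp hc).1]; decide)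
      · rw [show (".tif".toList) = '.' :: ['t','i','f'] by decide]
        intro hc
        exact hmem (by rw [((ends_iff l ['t','i','f'] (by decide)).mp hc).1]; decide)
      · rw [show (".tiff".toList) = '.' :: ['t','i','f','f'] by decide]
        intro hc
        exact hmem (by rw [((ends_iff l ['t','i','f','f'] (by decide)).mp hc).1]; decide)

-- ===== VERDICT (by name: the statement is the Claim_ definition above) =====
theorem is_photo_spec : Claim_equal_is_photo := by
  intro ii _
  unfold Spec_is_photo is_photo is_photo_alt
  cases h : (PySem.Dict.mk ii).get? "url" with
  | none => rfl
  | some url =>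
    simp only []
    have hfun : ∀ ext : String, PySem.Str.endswith (PySem.Str.lower url) ext =
        PySem.Chars.endswith (PySem.Chars.lower url.toList) ext.toList := by
      intro ext
      simp [pysem]
    simp only [hfun]
    exact any_endswith_eq_rpart (PySem.Chars.lower url.toList)
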